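-- pv_equiv track=rewrite | github.com/illegalprime/netrunner-things | transition/transition.py | markdown_transition
-- ===== SOURCE A (Python) =====
-- def markdown_transition(diff):
--     return '\n'.join([
--         '',
--         '### Transition',
--         '',
--     ] + [
--         '- **{}** _{}_'.format(
--             ('+' if count > 0 else '') + str(count),
--             card
--         )
--         for card, count in sorted(diff.items(), key=lambda c: c[1] > 0)
--     ])
-- ===== SOURCE B (Python) =====
-- def markdown_transition(diff):
--     positives = []
--     nonpositives = []
--     for card, count in diff.items():
--         if count > 0:
--             positives.append((card, count))
--         else:
--             nonpositives.append((card, count))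
--     lines = ['', '### Transition', '']
--     for card, count in nonpositives + positives:
--         lines.append('- **{}{}** _{}_'.format('+' if count > 0 else '', count, card))
--     return '\n'.join(lines)
-- ===== Notes on version B (the rewrite author's own statement) =====
-- stated objective: alternative
-- what changed: Replaces the stable sort by the boolean key count>0 with a single-pass partition into nonpositives and positives (insertion order preserved), then formats nonpositives + positives.
import Mathlib
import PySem

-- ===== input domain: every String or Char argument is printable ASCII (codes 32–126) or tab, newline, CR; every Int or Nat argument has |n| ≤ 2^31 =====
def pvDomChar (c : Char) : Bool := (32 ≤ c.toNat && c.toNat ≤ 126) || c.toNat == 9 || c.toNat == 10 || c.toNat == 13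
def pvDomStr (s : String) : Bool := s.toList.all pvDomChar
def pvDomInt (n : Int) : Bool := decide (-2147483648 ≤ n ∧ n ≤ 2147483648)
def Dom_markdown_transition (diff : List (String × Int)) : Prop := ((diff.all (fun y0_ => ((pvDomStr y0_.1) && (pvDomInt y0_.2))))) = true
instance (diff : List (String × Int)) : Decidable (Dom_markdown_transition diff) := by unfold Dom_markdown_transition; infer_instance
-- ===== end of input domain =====

-- ===== PORT A =====
-- B replaces A's stable sort by the boolean key count>0 with a one-pass stable partition (objective: alternative decomposition; not measured faster).
def pvFmtA (c : String × Int) : String :=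
  "- **" ++ (if c.2 > 0 then "+" else "") ++ PySem.Int.toStr c.2 ++ "** _" ++ c.1 ++ "_"

def markdown_transition (diff : List (String × Int)) : String :=
  PySem.Str.join "\n"
    (["", "### Transition", ""] ++
      (PySem.List.sorted diff (fun c => decide (c.2 > 0))).map pvFmtA)

-- ===== PORT B =====
def pvFmtB (c : String × Int) : String :=
  "- **" ++ (if c.2 > 0 then "+" else "") ++ PySem.Int.toStr c.2 ++ "** _" ++ c.1 ++ "_"
def markdown_transition_alt (diff : List (String × Int)) : String :=
  let parts := diff.foldl
    (fun (acc : List (String × Int) × List (String × Int)) c =>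
      if c.2 > 0 then (acc.1 ++ [c], acc.2) else (acc.1, acc.2 ++ [c]))
    ([], [])
  let lines := (parts.2 ++ parts.1).foldl
    (fun (ls : List String) c => ls ++ [pvFmtB c])
    ["", "### Transition", ""]
  PySem.Str.join "\n" lines

-- ===== PRECONDITION & SPEC =====
def Spec_markdown_transition (diff : List (String × Int)) (out : String) : Prop := out = markdown_transition_alt diff
instance (diff : List (String × Int)) (out : String) : Decidable (Spec_markdown_transition diff out) := by unfold Spec_markdown_transition; infer_instance

-- ===== CLAIM (what is proved, stated in full; the proofs are below) =====
def Claim_equal_markdown_transition : Prop := ∀ (diff : List (String × Int)), Dom_markdown_transition diff → Spec_markdown_transition diff (markdown_transition diff)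

-- ===== LEMMAS AND PROOFS =====

-- inserting an element whose key is false goes right before the true-keyed block
theorem insertBy_false {α : Type} (key : α → Bool) (x : α) (hx : key x = false) :
    ∀ (F T : List α), (∀ y ∈ F, key y = false) → (∀ y ∈ T, key y = true) →
      PySem.List.insertBy (fun a b => decide (key a < key b)) x (F ++ T) = F ++ x :: T := by
  intro F
  induction F with
  | nil =>
    intro T _ hT
    cases T with
    | nil => simp [PySem.List.insertBy]
    | cons t ts =>
      have ht : key t = true := hT t (by simp)
      simp [PySem.List.insertBy, hx, ht]
  | cons f fs ih =>
    intro T hF hT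
    have hf : key f = false := hF f (by simp)
    have : PySem.List.insertBy (fun a b => decide (key a < key b)) x (f :: (fs ++ T))
        = f :: PySem.List.insertBy (fun a b => decide (key a < key b)) x (fs ++ T) := by
      simp [PySem.List.insertBy, hx, hf]
    simpa [this] using congrArg (f :: ·) (ih T (fun y hy => hF y (by simp [hy])) hT)

-- the insertion-sort fold with a boolean key is the stable partition
theorem foldl_insertBy_partition {α : Type} (key : α → Bool) :
    ∀ (xs F T : List α), (∀ y ∈ F, key y = false) → (∀ y ∈ T, key y = true) →
      xs.foldl (fun acc x => PySem.List.insertBy (fun a b => decide (key a < key b)) x acc) (F ++ T)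
        = (F ++ xs.filter (fun c => !(key c))) ++ (T ++ xs.filter (fun c => key c)) := by
  intro xs
  induction xs with
  | nil => intro F T _ _; simp
  | cons x xs ih =>
    intro F T hF hT
    by_cases hx : key x = true
    · have hins : PySem.List.insertBy (fun a b => decide (key a < key b)) x (F ++ T)
          = (F ++ T) ++ [x] := by
        apply PySem.List.insertBy_of_forall_not_before
        intro y _; simp [hx]
      have := ih F (T ++ [x]) hF (by intro y hy; rcases List.mem_append.1 hy with h | h
                                     · exact hT y h
                                     · simp at h; simpa [h] using hx)
      simp only [List.foldl_cons, hins, List.append_assoc] at this ⊢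
      simp [this, hx]
    · have hx' : key x = false := by simpa using hx
      have hins := insertBy_false key x hx' F T hF hT
      have := ih (F ++ [x]) T (by intro y hy; rcases List.mem_append.1 hy with h | h
                                  · exact hF y h
                                  · simp at h; simpa [h] using hx') hT
      simp only [List.foldl_cons, hins]
      simpa [List.filter_cons, hx'] using this

theorem sorted_bool_key_eq_partition {α : Type} (key : α → Bool) (xs : List α) :
    PySem.List.sorted xs key false
      = xs.filter (fun c => !(key c)) ++ xs.filter (fun c => key c) := by
  rw [PySem.List.sorted_eq_foldl_insertBy]
  simpa using foldl_insertBy_partition key xs [] [] (by simp) (by simp)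

-- B's partition fold computes the two filters
theorem partition_fold_eq_filters :
    ∀ (xs : List (String × Int)) (a b : List (String × Int)),
      xs.foldl (fun (acc : List (String × Int) × List (String × Int)) c =>
          if c.2 > 0 then (acc.1 ++ [c], acc.2) else (acc.1, acc.2 ++ [c])) (a, b)
        = (a ++ xs.filter (fun c => decide (c.2 > 0)), b ++ xs.filter (fun c => !(decide (c.2 > 0)))) := by
  intro xs
  induction xs with
  | nil => intro a b; simp
  | cons x xs ih =>
    intro a b
    by_cases hx : x.2 > 0
    · simp [hx, ih]
    · simp [hx, ih]

-- B's line-building fold is the map appended to the header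
theorem lines_fold_eq_map (xs : List (String × Int)) :
    ∀ (init : List String),
      xs.foldl (fun (ls : List String) c => ls ++ [pvFmtB c]) init = init ++ xs.map pvFmtB := by
  induction xs with
  | nil => intro init; simp
  | cons x xs ih => intro init; simp [ih, List.append_assoc]

-- ===== VERDICT (by name: the statement is the Claim_ definition above) =====
theorem markdown_transition_spec : Claim_equal_markdown_transition := by
  intro diff _
  unfold Spec_markdown_transition markdown_transition markdown_transition_alt
  dsimp only
  rw [sorted_bool_key_eq_partition, partition_fold_eq_filters, lines_fold_eq_map]
  have hfmt : pvFmtA = pvFmtB := rfl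
  simp [hfmt]
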